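-- pv_equiv track=rewrite | github.com/AdamM-Advisor/noc-is-platform | backend/services/benchmark_service.py | month_sequence
-- ===== SOURCE A (Python) =====
-- def month_sequence(start_year: int, start_month: int, months: int) -> list[tuple[int, int]]:
--     if not 1 <= start_month <= 12:
--         raise ValueError("start_month must be between 1 and 12")
--     values = []
--     year = start_year
--     month = start_month
--     for _ in range(months):
--         values.append((year, month))
--         month += 1
--         if month > 12:
--             year += 1
--             month = 1
--     return values
-- ===== SOURCE B (Python) =====
-- def month_sequence(start_year: int, start_month: int, months: int) -> list[tuple[int, int]]:
--     if not 1 <= start_month <= 12: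
--         raise ValueError("start_month must be between 1 and 12")
--     base = start_year * 12 + (start_month - 1)
--     return [((base + i) // 12, (base + i) % 12 + 1) for i in range(months)]
-- ===== Notes on version B (the rewrite author's own statement) =====
-- stated objective: simpler
-- what changed: Replaced the stateful increment-and-carry loop (month counter with an 'if month > 12' rollover branch) by a closed-form comprehension: each element is computed directly from base = start_year*12 + start_month - 1 via floor division and modulus.
import Mathlib
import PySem

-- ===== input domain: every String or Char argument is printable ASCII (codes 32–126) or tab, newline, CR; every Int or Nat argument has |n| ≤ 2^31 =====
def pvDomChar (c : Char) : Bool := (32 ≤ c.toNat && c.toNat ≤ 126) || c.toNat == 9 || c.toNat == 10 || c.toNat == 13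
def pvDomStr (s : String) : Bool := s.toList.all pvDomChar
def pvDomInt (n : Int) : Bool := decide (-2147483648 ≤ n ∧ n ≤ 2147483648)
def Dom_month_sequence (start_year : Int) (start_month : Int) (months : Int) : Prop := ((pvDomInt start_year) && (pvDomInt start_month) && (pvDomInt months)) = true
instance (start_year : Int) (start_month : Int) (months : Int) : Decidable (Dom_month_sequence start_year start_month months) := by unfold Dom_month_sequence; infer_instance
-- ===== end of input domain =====

-- B replaces A's increment-and-carry month loop by a per-element floordiv/mod closed form (objective: simpler).

-- ===== PORT A =====
-- stateful loop: state = (values, year, month); month rolls over with an explicit branch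
def month_sequence (start_year : Int) (start_month : Int) (months : Int) : List (Int × Int) :=
  ((PySem.List.pyRange 0 months 1).foldl
    (fun (st : List (Int × Int) × Int × Int) _ =>
      let values := st.1 ++ [(st.2.1, st.2.2)]
      let month := st.2.2 + 1
      if month > 12 then (values, st.2.1 + 1, 1) else (values, st.2.1, month))
    ([], start_year, start_month)).1

-- ===== PORT B =====
def month_sequence_alt (start_year : Int) (start_month : Int) (months : Int) : List (Int × Int) :=
  let base := start_year * 12 + (start_month - 1)
  (PySem.List.pyRange 0 months 1).map
    (fun i => (PySem.Int.floordiv (base + i) 12, PySem.Int.mod (base + i) 12 + 1))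

-- ===== PRECONDITION & SPEC =====
-- A raises ValueError when start_month is outside 1..12; those inputs are excluded.
def Pre_month_sequence (start_year : Int) (start_month : Int) (months : Int) : Prop :=
  1 ≤ start_month ∧ start_month ≤ 12
instance (start_year : Int) (start_month : Int) (months : Int) : Decidable (Pre_month_sequence start_year start_month months) := by unfold Pre_month_sequence; infer_instance
def pvWitness_month_sequence : Int × Int × Int := (2023, 11, 5)

def Spec_month_sequence (start_year : Int) (start_month : Int) (months : Int) (out : List (Int × Int)) : Prop := out = month_sequence_alt start_year start_month months
instance (start_year : Int) (start_month : Int) (months : Int) (out : List (Int × Int)) : Decidable (Spec_month_sequence start_year start_month months out) := by unfold Spec_month_sequence; infer_instance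

-- ===== CLAIM (what is proved, stated in full; the proofs are below) =====
def Claim_equal_month_sequence : Prop := ∀ (start_year : Int) (start_month : Int) (months : Int), Dom_month_sequence start_year start_month months → Pre_month_sequence start_year start_month months → Spec_month_sequence start_year start_month months (month_sequence start_year start_month months)

-- ===== LEMMAS AND PROOFS =====

def pvStep (st : List (Int × Int) × Int × Int) (_ : Int) : List (Int × Int) × Int × Int :=
  let values := st.1 ++ [(st.2.1, st.2.2)]
  let month := st.2.2 + 1
  if month > 12 then (values, st.2.1 + 1, 1) else (values, st.2.1, month)

def pvCell (t : Int) : Int × Int := (PySem.Int.floordiv t 12, PySem.Int.mod t 12 + 1)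

lemma pvCell_eq (y mo : Int) (h1 : 1 ≤ mo) (h2 : mo ≤ 12) :
    pvCell (y * 12 + (mo - 1)) = (y, mo) := by
  have hfd : PySem.Int.floordiv (y * 12 + (mo - 1)) 12 = y := by
    rw [PySem.Int.floordiv_eq_iff_of_pos (by norm_num)]
    constructor <;> nlinarith
  have hmod := PySem.Int.floordiv_mul_add_mod (y * 12 + (mo - 1)) 12
  rw [hfd] at hmod
  simp [pvCell]
  omega

lemma pvLoop_inv (l : List Int) (acc : List (Int × Int)) (y mo : Int)
    (h1 : 1 ≤ mo) (h2 : mo ≤ 12) :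
    (l.foldl pvStep (acc, y, mo)).1 =
      acc ++ (List.range l.length).map (fun (k : Nat) => pvCell (y * 12 + (mo - 1) + (k : Int))) := by
  induction l generalizing acc y mo with
  | nil => simp
  | cons a l ih =>
    have hrange : (List.range (l.length + 1)).map (fun (k : Nat) => pvCell (y * 12 + (mo - 1) + (k : Int)))
        = pvCell (y * 12 + (mo - 1)) ::
          (List.range l.length).map (fun (k : Nat) => pvCell (y * 12 + (mo - 1) + 1 + (k : Int))) := by
      rw [List.range_succ_eq_map, List.map_cons, List.map_map]
      refine congrArg₂ _ (by norm_num) (List.map_congr_left fun k _ => ?_)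
      simp only [Function.comp_apply]
      congr 1
      push_cast
      ring
    simp only [List.foldl_cons, List.length_cons]
    rw [hrange]
    by_cases h : mo + 1 > 12
    · have hmo : mo = 12 := by omega
      subst hmo
      rw [show pvStep (acc, y, 12) a = (acc ++ [(y, 12)], y + 1, 1) by
        simp [pvStep]]
      rw [ih _ _ _ (by norm_num) (by norm_num)]
      rw [pvCell_eq y 12 (by norm_num) (by norm_num), List.append_assoc]
      refine congrArg _ (congrArg₂ _ rfl (List.map_congr_left fun k _ => ?_))
      congr 1
      ring
    · rw [show pvStep (acc, y, mo) a = (acc ++ [(y, mo)], y, mo + 1) by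
        simp [pvStep, h]]
      rw [ih _ _ _ (by omega) (by omega)]
      rw [pvCell_eq y mo h1 h2, List.append_assoc]
      refine congrArg _ (congrArg₂ _ rfl (List.map_congr_left fun k _ => ?_))
      congr 1
      ring

lemma pvAlt_eq (start_year start_month months : Int) :
    month_sequence_alt start_year start_month months =
      (List.range months.toNat).map
        (fun (k : Nat) => pvCell (start_year * 12 + (start_month - 1) + (k : Int))) := by
  unfold month_sequence_alt pvCell
  rw [PySem.List.pyRange_one]
  rw [List.map_map]
  simp only [Int.sub_zero]
  refine List.map_congr_left fun k _ => ?_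
  simp

-- ===== VERDICT (by name: the statement is the Claim_ definition above) =====
theorem month_sequence_spec : Claim_equal_month_sequence := by
  intro sy sm m _ hpre
  unfold Spec_month_sequence month_sequence
  rw [show (fun (st : List (Int × Int) × Int × Int) (_ : Int) =>
      let values := st.1 ++ [(st.2.1, st.2.2)]
      let month := st.2.2 + 1
      if month > 12 then (values, st.2.1 + 1, 1) else (values, st.2.1, month)) = pvStep from rfl]
  rw [pvLoop_inv _ [] sy sm hpre.1 hpre.2, pvAlt_eq]
  simp [PySem.List.length_pyRange_one]
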